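-- pv_equiv track=rewrite | github.com/dodohyun0807/Algorithm | Programmers/선입선출스케줄링.py | solution
-- ===== SOURCE A (Python) =====
-- def solution(n, cores):
-- #     leng = len(cores)
--
-- #     if leng >= n:
-- #         return n
--
--
-- #     work = [0 for _ in range(leng)]
--
-- #     while True:
-- #         for i in range(leng):
-- #             if work[i] == 0:
-- #                 n -= 1
-- #                 if n == 0:
-- #                     return i+1
-- #                 work[i] = cores[i]
-- #             work[i] -=
--
--     len_cores = len(cores)
--
--     if n < len_cores:
--         return n
--
--     n -= len_cores
--     left, right = 1, max(cores) * n
--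
--     while left < right:  # 이분 탐색
--         mid = (left + right) // 2
--         temp = 0
--         for c in cores:
--             temp += mid // c
--
--         if temp >= n:
--             right = mid
--         else:
--             left = mid + 1
--
--     n -= sum(map(lambda x: (right - 1) // x, cores))
--
--     for i in range(len_cores):
--         if right % cores[i] == 0:
--             n -= 1
--             if n == 0:
--                 return i + 1
-- ===== SOURCE B (Python) =====
-- def solution(n, cores):
--     # event-driven schedule: one exact harmonic jump to just before the answer
--     # time, then hop finish-event to finish-event handing out jobs in index order
--     L = len(cores)
--     if n <= L:
--         return n
--     m = n - L  # rank of the job among those started after time 0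
--     Q = 1 << 80
--     hnum = 0  # ceil-overestimate of Q * sum(1/c)
--     for c in cores:
--         hnum += Q // c + 1
--     t = (m - 1 - L) * Q // hnum  # guaranteed: jobs started by time t < m
--     if t < 0:
--         t = 0
--     r = m
--     for c in cores:
--         r -= t // c  # jobs still to hand out after time t
--     while True:
--         t = min(c * (t // c + 1) for c in cores)  # next finish event
--         for i, c in enumerate(cores):
--             if t % c == 0:
--                 r -= 1
--                 if r == 0:
--                     return i + 1
-- ===== Notes on version B (the rewrite author's own statement) =====
-- stated objective: alternative
-- what changed: B replaces A's binary search over finish times by an event-driven simulation: one closed-form harmonic jump lands just before the answer time, then the loop hops from finish event to finish event (min of each core's next multiple) handing out jobs in index order until the target job is reached; no search loop and no divisor-count re-scan of candidate times.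
-- outside the precondition, e.g. on solution(2, [-3, 2]): A returns 1, B returns 2; on solution(3, [-1, 2, 2]): A returns 1, B returns 3; on solution(1, []): A raises ValueError, B raises ZeroDivisionError
import Mathlib
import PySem

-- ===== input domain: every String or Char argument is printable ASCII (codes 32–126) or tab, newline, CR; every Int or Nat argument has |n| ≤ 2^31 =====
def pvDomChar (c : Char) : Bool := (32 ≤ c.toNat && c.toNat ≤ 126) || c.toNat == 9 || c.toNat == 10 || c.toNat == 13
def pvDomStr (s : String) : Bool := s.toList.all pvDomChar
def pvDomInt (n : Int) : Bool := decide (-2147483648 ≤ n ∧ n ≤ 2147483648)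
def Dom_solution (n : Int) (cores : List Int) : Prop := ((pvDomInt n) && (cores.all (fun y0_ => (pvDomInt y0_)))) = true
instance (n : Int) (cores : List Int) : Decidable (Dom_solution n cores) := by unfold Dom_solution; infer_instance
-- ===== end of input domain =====

-- B replaces A's binary search over finish times by an event-driven simulation: a single
-- closed-form harmonic jump to a time strictly before the answer, then hopping from finish
-- event to finish event (min of each core's next multiple) handing out jobs in index order;
-- objective: alternative.

-- ===== PORT A =====

-- A's `while left < right` binary-search loop
def solBinA (cores : List Int) (m left right : Int) : Int :=
  if h : left < right then
    let mid := PySem.Int.floordiv (left + right) 2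
    let temp := cores.foldl (fun acc c => acc + PySem.Int.floordiv mid c) 0
    if temp ≥ m then solBinA cores m left mid
    else solBinA cores m (mid + 1) right
  else right
termination_by (right - left).toNat
decreasing_by
  · have h2 : PySem.Int.floordiv (left + right) 2 < right := by
      rw [PySem.Int.floordiv_lt_iff_lt_mul (by omega : (0:Int) < 2)]; omega
    omega
  · have h1 := PySem.Int.floordiv_two_mid_bounds (le_of_lt h)
    omega

-- A's final `for i in range(len_cores)` loop (returns 0 where the Python falls off and returns None)
def solTailA (r : Int) : List Int → Int → Int → Int
  | [], _, _ => 0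
  | c :: cs, nn, i =>
      if PySem.Int.mod r c == 0 then
        if nn - 1 == 0 then i + 1 else solTailA r cs (nn - 1) (i + 1)
      else solTailA r cs nn (i + 1)

def solution (n : Int) (cores : List Int) : Int :=
  let len_cores : Int := cores.length
  if n < len_cores then n
  else
    let n1 := n - len_cores
    match PySem.List.max? cores (fun x => x) with
    | none => 0   -- max(()) raises ValueError; these inputs are excluded by Pre_
    | some mx =>
      let right := solBinA cores n1 1 (mx * n1)
      let n2 := n1 - (cores.map (fun x => PySem.Int.floordiv (right - 1) x)).sum
      solTailA right cores n2 0

-- ===== PORT B =====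

-- B's `min(c * (t // c + 1) for c in cores)` (0 stands for min(())'s ValueError; unreachable under Pre_)
def solNextB (cores : List Int) (t : Int) : Int :=
  match PySem.List.min? (cores.map (fun c => c * (PySem.Int.floordiv t c + 1))) (fun x => x) with
  | some v => v
  | none => 0

-- B's inner `for i, c in enumerate(cores)` loop: the answer, or the remaining job count
def solScanB (t : Int) : List Int → Int → Int → Int ⊕ Int
  | [], r, _ => Sum.inr r
  | c :: cs, r, i =>
      if PySem.Int.mod t c == 0 then
        if r - 1 == 0 then Sum.inl (i + 1) else solScanB t cs (r - 1) (i + 1)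
      else solScanB t cs r (i + 1)

-- B's `while True` event loop, totalized by fuel (each round hands out ≥ 1 job, so
-- r.toNat rounds suffice on the admitted inputs)
def solEvtB (cores : List Int) : Nat → Int → Int → Int
  | 0, _, _ => 0
  | fuel + 1, t, r =>
      let t' := solNextB cores t
      match solScanB t' cores r 0 with
      | Sum.inl a => a
      | Sum.inr r' => solEvtB cores fuel t' r'

def solution_alt (n : Int) (cores : List Int) : Int :=
  let L : Int := cores.length
  if n ≤ L then n
  else
    let m := n - L
    let q : Int := 2 ^ 80
    let hnum := cores.foldl (fun s c => s + (PySem.Int.floordiv q c + 1)) 0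
    let t0 := PySem.Int.floordiv ((m - 1 - L) * q) hnum
    let t1 := if t0 < 0 then 0 else t0
    let r := cores.foldl (fun s c => s - PySem.Int.floordiv t1 c) m
    solEvtB cores r.toNat t1 r

-- ===== PRECONDITION & SPEC =====
-- Pre_ excludes inputs with n ≥ len(cores) whose cores list is empty (max([]) raises ValueError),
-- contains 0 (ZeroDivisionError) or contains a negative period, on which A's degenerate binary
-- search either returns None (not an int) or an accidental junk index.
def Pre_solution (n : Int) (cores : List Int) : Prop :=
  n < cores.length ∨ (cores ≠ [] ∧ ∀ c ∈ cores, 0 < c)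
instance (n : Int) (cores : List Int) : Decidable (Pre_solution n cores) := by
  unfold Pre_solution; infer_instance

def pvWitness_solution : Int × List Int := (7, [1, 2, 3])

def Spec_solution (n : Int) (cores : List Int) (out : Int) : Prop := out = solution_alt n cores
instance (n : Int) (cores : List Int) (out : Int) : Decidable (Spec_solution n cores out) := by
  unfold Spec_solution; infer_instance

-- ===== CLAIM (what is proved, stated in full; the proofs are below) =====
def Claim_equal_solution : Prop := ∀ (n : Int) (cores : List Int),
  Dom_solution n cores → Pre_solution n cores → Spec_solution n cores (solution n cores)

-- ===== LEMMAS AND PROOFS =====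

-- the number of jobs started during times 1..t, as A sums it
def solF (cores : List Int) (t : Int) : Int :=
  (cores.map (fun c => PySem.Int.floordiv t c)).sum

theorem solF_mono {cores : List Int} (hpos : ∀ c ∈ cores, 0 < c) {t u : Int} (h : t ≤ u) :
    solF cores t ≤ solF cores u := by
  apply List.sum_le_sum
  intro c hc
  rw [PySem.Int.floordiv_eq_ediv_of_pos (hpos c hc), PySem.Int.floordiv_eq_ediv_of_pos (hpos c hc)]
  exact Int.ediv_le_ediv (hpos c hc) h

theorem solF_nonpos {cores : List Int} (hpos : ∀ c ∈ cores, 0 < c) {t : Int} (ht : t ≤ 0) :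
    solF cores t ≤ 0 := by
  unfold solF
  have hb : ∀ c ∈ cores, PySem.Int.floordiv t c ≤ (fun _ : Int => (0:Int)) c := by
    intro c hc
    have h2 : t < 1 * c := by have := hpos c hc; omega
    have := (PySem.Int.floordiv_lt_iff_lt_mul (q := 1) (hpos c hc)).mpr h2
    simpa using by omega
  calc (cores.map (fun c => PySem.Int.floordiv t c)).sum
      ≤ (cores.map (fun _ => (0:Int))).sum := List.sum_le_sum hb
    _ = 0 := by simp

theorem foldl_add_floordiv (cores : List Int) (t : Int) :
    cores.foldl (fun acc c => acc + PySem.Int.floordiv t c) 0 = solF cores t := by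
  rw [PySem.List.foldl_add]; simp [solF]

-- A's binary search returns the least t with m ≤ solF cores t
theorem solBinA_spec (cores : List Int) (m : Int) (hpos : ∀ c ∈ cores, 0 < c) :
    ∀ l r, l ≤ r → m ≤ solF cores r → (∀ t, t < l → solF cores t < m) →
      l ≤ solBinA cores m l r ∧ solBinA cores m l r ≤ r ∧
      m ≤ solF cores (solBinA cores m l r) ∧
      ∀ t, t < solBinA cores m l r → solF cores t < m := by
  intro l r
  fun_induction solBinA cores m l r with
  | case1 l r h mid temp htemp ih =>
    intro _ hr hl
    have hmb := PySem.Int.floordiv_two_mid_bounds (le_of_lt h)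
    have hmid : mid = PySem.Int.floordiv (l + r) 2 := rfl
    have htemp' : m ≤ solF cores mid := by
      simp only [temp] at htemp
      simp [foldl_add_floordiv] at htemp
      exact htemp
    simp only [foldl_add_floordiv]
    rw [if_pos (by exact htemp')]
    obtain ⟨a, b, c, d⟩ := ih (by omega) htemp' hl
    exact ⟨a, by omega, c, d⟩
  | case2 l r h mid temp htemp ih =>
    intro _ hr hl
    have hmb := PySem.Int.floordiv_two_mid_bounds (le_of_lt h)
    have hmid : mid = PySem.Int.floordiv (l + r) 2 := rfl
    have hmid2 : mid < r := by
      rw [hmid, PySem.Int.floordiv_lt_iff_lt_mul (by omega : (0:Int) < 2)]; omega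
    have htemp' : ¬ m ≤ solF cores mid := by
      simp only [temp] at htemp
      simp [foldl_add_floordiv] at htemp
      omega
    simp only [foldl_add_floordiv]
    rw [if_neg (by exact htemp')]
    have hl' : ∀ t, t < mid + 1 → solF cores t < m := by
      intro t ht
      by_cases htm : t < l
      · exact hl t htm
      · have h1 : solF cores t ≤ solF cores mid := solF_mono hpos (by omega)
        omega
    obtain ⟨a, b, c, d⟩ := ih (by omega) hr hl'
    exact ⟨le_trans (by omega) a, b, c, d⟩
  | case3 l r h =>
    intro hlr hr hl
    exact ⟨by omega, by omega, hr, fun t ht => hl t (by omega)⟩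

-- one divisibility step of the cost function
theorem floordiv_step {c : Int} (hc : 0 < c) (t : Int) :
    PySem.Int.floordiv t c - PySem.Int.floordiv (t - 1) c
      = if PySem.Int.mod t c == 0 then 1 else 0 := by
  by_cases hd : c ∣ t
  · rcases hd with ⟨q, hq⟩
    have h1 : PySem.Int.floordiv t c = q := by
      rw [PySem.Int.floordiv_eq_iff_of_pos hc]; constructor <;> nlinarith
    have h2 : PySem.Int.floordiv (t - 1) c = q - 1 := by
      rw [PySem.Int.floordiv_eq_iff_of_pos hc]; constructor <;> nlinarith
    have hm : PySem.Int.mod t c = 0 := (PySem.Int.mod_eq_zero_iff_dvd t c).mpr ⟨q, hq⟩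
    simp [h1, h2, hm]
  · have hm : ¬ PySem.Int.mod t c = 0 := fun h => hd ((PySem.Int.mod_eq_zero_iff_dvd t c).mp h)
    set q := PySem.Int.floordiv t c with hq
    have hb := (PySem.Int.floordiv_eq_iff_of_pos hc).mp hq.symm
    have hne : q * c ≠ t := fun h => hd ⟨q, by rw [← h, mul_comm]⟩
    have hexp : (q + 1) * c = q * c + c := by ring
    have h2 : PySem.Int.floordiv (t - 1) c = q := by
      rw [PySem.Int.floordiv_eq_iff_of_pos hc]; omega
    simp only [h2, beq_iff_eq]
    rw [if_neg hm]; omega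

theorem solF_step {cores : List Int} (hpos : ∀ c ∈ cores, 0 < c) (t : Int) :
    solF cores t - solF cores (t - 1)
      = (cores.countP (fun c => PySem.Int.mod t c == 0) : Int) := by
  unfold solF
  rw [← PySem.List.sum_map_ite_one_zero (fun c => PySem.Int.mod t c == 0) cores]
  have h : (cores.map (fun c => PySem.Int.floordiv t c)).sum
      = (cores.map (fun c => PySem.Int.floordiv (t-1) c
          + (if PySem.Int.mod t c == 0 then 1 else 0))).sum := by
    congr 1
    apply List.map_congr_left
    intro c hc
    have := floordiv_step (hpos c hc) t
    omega
  rw [h, PySem.List.sum_map_add_int]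
  ring

-- A's tail loop walks the whole list when every core finishes at r (the n = len(cores) case, r = 0)
theorem solTailA_all (r : Int) : ∀ (cs : List Int) (i : Int), cs ≠ [] →
    (∀ c ∈ cs, PySem.Int.mod r c == 0) → solTailA r cs (cs.length : Int) i = i + cs.length := by
  intro cs
  induction cs with
  | nil => intro i h; exact absurd rfl h
  | cons c cs ih =>
    intro i _ hall
    rw [solTailA, if_pos (hall c List.mem_cons_self)]
    match hcs : cs with
    | [] => simp
    | c' :: cs' =>
      rw [if_neg (by simp; omega)]
      have := ih (i + 1) (by simp) (fun x hx => hall x (List.mem_cons_of_mem _ hx))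
      rw [show ((c :: c' :: cs').length : Int) - 1 = ((c' :: cs').length : Int) by simp]
      rw [this]
      simp
      omega

-- a subtracting foldl is the initial value minus the mapped sum
theorem foldl_sub_eq (f : Int → Int) : ∀ (l : List Int) (a : Int),
    l.foldl (fun s c => s - f c) a = a - (l.map f).sum := by
  intro l
  induction l with
  | nil => intro a; simp
  | cons c cs ih => intro a; simp [List.foldl_cons, ih]; ring

-- B's inner scan: the answer when ≤ countP jobs remain, the leftover count otherwise
theorem solScanB_spec (t : Int) : ∀ (cs : List Int) (r i : Int), 1 ≤ r →
    solScanB t cs r i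
      = if r ≤ (cs.countP (fun c => PySem.Int.mod t c == 0) : Int)
        then Sum.inl (solTailA t cs r i)
        else Sum.inr (r - (cs.countP (fun c => PySem.Int.mod t c == 0) : Int)) := by
  intro cs
  induction cs with
  | nil => intro r i h1; simp [solScanB, solTailA]; omega
  | cons c cs ih =>
    intro r i h1
    by_cases h : PySem.Int.mod t c == 0
    · rw [solScanB, solTailA, List.countP_cons]
      simp only [h, if_true]
      by_cases hr : r - 1 == 0
      · have hr1 : r = 1 := by simp only [beq_iff_eq] at hr; omega
        rw [if_pos hr, if_pos hr, if_pos (by push_cast; omega)]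
      · have hr2 : 2 ≤ r := by simp only [beq_iff_eq] at hr; omega
        rw [if_neg hr, if_neg hr, ih (r - 1) (i + 1) (by omega)]
        by_cases hle : r - 1 ≤ (cs.countP (fun c => PySem.Int.mod t c == 0) : Int)
        · rw [if_pos hle, if_pos (by push_cast; omega)]
        · rw [if_neg hle, if_neg (by push_cast; omega)]
          congr 1
          push_cast
          omega
    · rw [solScanB, solTailA, List.countP_cons, if_neg h, if_neg h, if_neg h, Nat.add_zero]
      exact ih r (i + 1) h1

-- every core's next multiple lies strictly after t
theorem next_mult_gt {c : Int} (hc : 0 < c) (t : Int) :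
    t < c * (PySem.Int.floordiv t c + 1) := by
  set q := PySem.Int.floordiv t c with hq
  have hb := (PySem.Int.floordiv_eq_iff_of_pos hc).mp hq.symm
  nlinarith

-- the next multiple of c after t bounds every multiple of c after t
theorem next_mult_le {c : Int} (hc : 0 < c) {t u : Int} (hd : c ∣ u) (htu : t < u) :
    c * (PySem.Int.floordiv t c + 1) ≤ u := by
  rcases hd with ⟨k, hk⟩
  have h1 : PySem.Int.floordiv t c < k := by
    rw [PySem.Int.floordiv_lt_iff_lt_mul hc]
    nlinarith
  nlinarith

-- facts about B's next event time: greater than t, at most the next job-finishing time, a finish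
theorem solNextB_spec (cores : List Int) (hne : cores ≠ []) (hpos : ∀ c ∈ cores, 0 < c)
    (t : Int) :
    t < solNextB cores t ∧ (∃ c0 ∈ cores, c0 ∣ solNextB cores t) ∧
    (∀ u, t < u → (∃ c ∈ cores, c ∣ u) → solNextB cores t ≤ u) := by
  obtain ⟨v, hv⟩ : ∃ v, PySem.List.min? (cores.map (fun c => c * (PySem.Int.floordiv t c + 1)))
      (fun x => x) = some v := by
    cases he : PySem.List.min? (cores.map (fun c => c * (PySem.Int.floordiv t c + 1)))
        (fun x => x) with
    | none =>
      exact absurd (List.map_eq_nil_iff.mp ((PySem.List.min?_eq_none_iff _ _).mp he)) hne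
    | some v => exact ⟨v, rfl⟩
  have hval : solNextB cores t = v := by simp [solNextB, hv]
  obtain ⟨c0, hc0m, hc0⟩ := List.mem_map.mp (PySem.List.min?_mem hv)
  have hmin := PySem.List.min?_isMin hv
  refine ⟨?_, ⟨c0, hc0m, ?_⟩, ?_⟩
  · rw [hval, ← hc0]
    exact next_mult_gt (hpos c0 hc0m) t
  · rw [hval, ← hc0]
    exact ⟨PySem.Int.floordiv t c0 + 1, rfl⟩
  · intro u htu ⟨c, hcm, hcd⟩
    rw [hval]
    calc v ≤ c * (PySem.Int.floordiv t c + 1) :=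
          hmin _ (List.mem_map_of_mem hcm)
      _ ≤ u := next_mult_le (hpos c hcm) hcd htu

-- solF is constant across an interval containing no finish event
theorem solF_const {cores : List Int} (hpos : ∀ c ∈ cores, 0 < c) (t : Int)
    (t' : Int) (hnoev : ∀ u, t < u → u < t' → ¬ ∃ c ∈ cores, c ∣ u) :
    ∀ k : Nat, t + k < t' → solF cores (t + k) = solF cores t := by
  intro k
  induction k with
  | zero => intro _; norm_num
  | succ k ih =>
    intro hk
    have hne : ¬ ∃ c ∈ cores, c ∣ (t + (k + 1 : Nat)) := by
      apply hnoev
      · push_cast; omega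
      · exact hk
    have hcnt : cores.countP (fun c => PySem.Int.mod (t + (k + 1 : Nat)) c == 0) = 0 := by
      rw [List.countP_eq_zero]
      intro c hc hmod
      exact hne ⟨c, hc, (PySem.Int.mod_eq_zero_iff_dvd _ _).mp (by simpa using hmod)⟩
    have hstep := solF_step hpos (t + (k + 1 : Nat))
    rw [hcnt] at hstep
    have heq : (t + (k + 1 : Nat)) - 1 = t + (k : Nat) := by push_cast; omega
    rw [heq] at hstep
    have := ih (by push_cast at hk ⊢; omega)
    omega

-- the event loop, started strictly before the answer time T with the true remaining count,
-- lands exactly on A's tail-loop selection at T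
theorem solEvtB_run (cores : List Int) (hne : cores ≠ []) (hpos : ∀ c ∈ cores, 0 < c)
    (m T : Int) (hT1 : m ≤ solF cores T) (hT2 : ∀ s, s < T → solF cores s < m) :
    ∀ (fuel : Nat) (t : Int), t < T → 1 ≤ m - solF cores t → (m - solF cores t).toNat ≤ fuel →
      solEvtB cores fuel t (m - solF cores t)
        = solTailA T cores (m - solF cores (T - 1)) 0 := by
  intro fuel
  induction fuel with
  | zero => intro t _ h1 h2; omega
  | succ fuel ih =>
    intro t htT h1 hfuel
    obtain ⟨hgt, hev, hleast⟩ := solNextB_spec cores hne hpos t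
    set t' := solNextB cores t with ht'
    -- T is itself a finish event
    have hTev : ∃ c ∈ cores, c ∣ T := by
      have hstep := solF_step hpos T
      have hlt : solF cores (T - 1) < m := hT2 _ (by omega)
      obtain ⟨c, hc, hcp⟩ : ∃ c ∈ cores, (PySem.Int.mod T c == 0) = true := by
        by_contra hno
        push_neg at hno
        have hz : cores.countP (fun c => PySem.Int.mod T c == 0) = 0 :=
          List.countP_eq_zero.mpr (fun c hc => by simpa using hno c hc)
        omega
      exact ⟨c, hc, (PySem.Int.mod_eq_zero_iff_dvd _ _).mp (by simpa using hcp)⟩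
    have ht'T : t' ≤ T := hleast T htT hTev
    -- no event strictly between t and t', so solF (t' - 1) = solF t
    have hnoev : ∀ u, t < u → u < t' → ¬ ∃ c ∈ cores, c ∣ u := by
      intro u h1u h2u hu
      exact absurd (hleast u h1u hu) (by omega)
    have hconst : solF cores (t' - 1) = solF cores t := by
      have := solF_const hpos t t' hnoev (t' - 1 - t).toNat (by omega)
      rw [show t + ((t' - 1 - t).toNat : Int) = t' - 1 by omega] at this
      exact this
    -- the count of cores finishing at t' (≥ 1)
    set cnt : Int := (cores.countP (fun c => PySem.Int.mod t' c == 0) : Int) with hcnt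
    have hstep' := solF_step hpos t'
    have hcnt1 : 1 ≤ cnt := by
      obtain ⟨c0, hc0m, hc0d⟩ := hev
      have : cores.countP (fun c => PySem.Int.mod t' c == 0) ≠ 0 := by
        rw [Ne, List.countP_eq_zero]
        intro hall
        exact absurd ((PySem.Int.mod_eq_zero_iff_dvd _ _).mpr hc0d)
          (by simpa using hall c0 hc0m)
      omega
    have hFt' : solF cores t' = solF cores t + cnt := by omega
    rw [solEvtB]
    rw [solScanB_spec t' cores _ 0 h1]
    by_cases hcase : m - solF cores t ≤ cnt
    · -- this event is the answer time: t' = T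
      rw [if_pos hcase]
      have hTt' : t' = T := by
        by_contra hneq
        have : t' < T := by omega
        have := hT2 t' this
        omega
      rw [hTt'] at hconst ⊢
      rw [hconst]
    · rw [if_neg hcase]
      have ht'T2 : t' < T := by
        by_contra hq
        have : t' = T := by omega
        rw [← this, hFt'] at hT1
        omega
      have harg : m - solF cores t - cnt = m - solF cores t' := by omega
      rw [harg]
      exact ih t' ht'T2 (by omega) (by omega)

-- ===== VERDICT (by name: the statement is the Claim_ definition above) =====
theorem solution_spec : Claim_equal_solution := by
  unfold Claim_equal_solution
  intro n cores hdom hpre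
  unfold Spec_solution
  simp only [solution, solution_alt]
  by_cases hlt : n < (cores.length : Int)
  · rw [if_pos hlt, if_pos (le_of_lt hlt)]
  · have hpc : cores ≠ [] ∧ ∀ c ∈ cores, 0 < c := by
      rcases hpre with h | h
      · exact absurd h hlt
      · exact h
    obtain ⟨hne, hpos⟩ := hpc
    rw [if_neg hlt]
    obtain ⟨mx, hmx⟩ : ∃ mx, PySem.List.max? cores (fun x => x) = some mx := by
      cases hmxe : PySem.List.max? cores (fun x => x) with
      | none => exact absurd (((PySem.List.max?_eq_none_iff _ _).mp hmxe)) hne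
      | some mx => exact ⟨mx, rfl⟩
    simp only [hmx]
    have hmem : mx ∈ cores := PySem.List.max?_mem hmx
    have hmxpos : 0 < mx := hpos mx hmem
    by_cases heq : n = (cores.length : Int)
    · -- n == len(cores): A's machinery degenerates to returning len(cores)
      rw [if_pos (le_of_eq heq)]
      have hz : n - (cores.length : Int) = 0 := by omega
      rw [hz]
      have hbin : solBinA cores 0 1 (mx * 0) = 0 := by
        rw [solBinA]; norm_num
      rw [hbin]
      have hsum : (cores.map (fun x => PySem.Int.floordiv ((0:Int) - 1) x)).sum
          = -(cores.length : Int) := by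
        have hcongr : ∀ c ∈ cores, PySem.Int.floordiv ((0:Int) - 1) c = (fun _ : Int => (-1:Int)) c := by
          intro c hc
          have hc1 := hpos c hc
          rw [PySem.Int.floordiv_eq_iff_of_pos hc1]
          constructor <;> nlinarith
        rw [List.map_congr_left hcongr]
        simp [List.sum_replicate]
      rw [hsum]
      have hall : ∀ c ∈ cores, PySem.Int.mod (0:Int) c == 0 := by
        intro c hc
        simp [PySem.Int.mod_eq_zero_iff_dvd]
      have := solTailA_all 0 cores 0 hne hall
      rw [show (0:Int) - -(cores.length : Int) = (cores.length : Int) by omega, this]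
      omega
    · -- len(cores) < n: A's binary search vs B's jump + event loop
      rw [if_neg (by omega)]
      set L : Int := (cores.length : Int) with hL
      have hL1 : 1 ≤ L := by
        rw [hL]
        have : cores.length ≠ 0 := fun h => hne (List.eq_nil_of_length_eq_zero h)
        omega
      set m := n - L with hm
      have hm1 : 1 ≤ m := by omega
      -- A's answer time T
      have hPmx : m ≤ solF cores (mx * m) := by
        have hterm : m ≤ PySem.Int.floordiv (mx * m) mx := by
          rw [PySem.Int.le_floordiv_iff_mul_le hmxpos]; nlinarith
        have hnn : ∀ y ∈ cores.map (fun c => PySem.Int.floordiv (mx * m) c), 0 ≤ y := by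
          intro y hy
          obtain ⟨c, hc, rfl⟩ := List.mem_map.mp hy
          rw [PySem.Int.le_floordiv_iff_mul_le (hpos c hc)]
          nlinarith [hpos c hc]
        have hmm : PySem.Int.floordiv (mx * m) mx
            ∈ cores.map (fun c => PySem.Int.floordiv (mx * m) c) :=
          List.mem_map_of_mem hmem
        have := List.single_le_sum hnn _ hmm
        calc m ≤ PySem.Int.floordiv (mx * m) mx := hterm
          _ ≤ (cores.map (fun c => PySem.Int.floordiv (mx * m) c)).sum := this
      have hlow1 : ∀ t, t < 1 → solF cores t < m := by
        intro t ht
        exact lt_of_le_of_lt (solF_nonpos hpos (by omega)) (by omega)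
      obtain ⟨ha1, ha2, ha3, ha4⟩ := solBinA_spec cores m hpos 1 (mx * m)
        (by nlinarith) hPmx hlow1
      set T := solBinA cores m 1 (mx * m) with hT
      -- B's starting time t1 satisfies solF t1 ≤ m - 1, hence t1 < T
      set q : Int := 2 ^ 80 with hq
      have hnum_eq : cores.foldl (fun s c => s + (PySem.Int.floordiv q c + 1)) 0
          = (cores.map (fun c => PySem.Int.floordiv q c + 1)).sum := by
        rw [PySem.List.foldl_add]; simp
      set hnum := (cores.map (fun c => PySem.Int.floordiv q c + 1)).sum with hhnum
      have hnum_pos : 0 < hnum := by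
        have hb : ∀ y ∈ cores.map (fun c => PySem.Int.floordiv q c + 1), 1 ≤ y := by
          intro y hy
          obtain ⟨c, hc, rfl⟩ := List.mem_map.mp hy
          have : 0 ≤ PySem.Int.floordiv q c := by
            rw [PySem.Int.le_floordiv_iff_mul_le (hpos c hc)]
            rw [hq]; norm_num
          omega
        obtain ⟨c0, hc0⟩ : ∃ c0, c0 ∈ cores := by
          cases cores with
          | nil => exact absurd rfl hne
          | cons a l => exact ⟨a, List.mem_cons_self⟩
        calc (0:Int) < 1 := by omega
          _ ≤ PySem.Int.floordiv q c0 + 1 := hb _ (List.mem_map_of_mem hc0)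
          _ ≤ hnum := List.single_le_sum (fun y hy => by have := hb y hy; omega) _
              (List.mem_map_of_mem hc0)
      set t0 := PySem.Int.floordiv ((m - 1 - L) * q) hnum with ht0
      set t1 := if t0 < 0 then 0 else t0 with ht1
      have hFt1 : solF cores t1 ≤ m - 1 := by
        by_cases hneg : t0 < 0
        · rw [ht1, if_pos hneg]
          have := solF_nonpos hpos (le_refl (0:Int))
          omega
        · rw [ht1, if_neg hneg]
          push_neg at hneg
          -- per-core: floordiv t0 c * q ≤ t0 * (floordiv q c + 1)
          have hper : ∀ c ∈ cores, PySem.Int.floordiv t0 c * q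
              ≤ t0 * (PySem.Int.floordiv q c + 1) := by
            intro c hc
            have hcpos := hpos c hc
            set a := PySem.Int.floordiv t0 c with ha
            have hab := (PySem.Int.floordiv_eq_iff_of_pos hcpos).mp ha.symm
            have ha0 : 0 ≤ a := by nlinarith
            set b := PySem.Int.floordiv q c with hbq
            have hbb := (PySem.Int.floordiv_eq_iff_of_pos hcpos).mp hbq.symm
            calc a * q ≤ a * ((b + 1) * c) := by nlinarith
              _ = (a * c) * (b + 1) := by ring
              _ ≤ t0 * (b + 1) := by nlinarith
          have hsumle : solF cores t0 * q ≤ t0 * hnum := by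
            have h1 : solF cores t0 * q
                = (cores.map (fun c => PySem.Int.floordiv t0 c * q)).sum := by
              rw [solF, ← List.sum_map_mul_right]
            have h2 : t0 * hnum
                = (cores.map (fun c => t0 * (PySem.Int.floordiv q c + 1))).sum := by
              rw [hhnum, ← List.sum_map_mul_left]
            rw [h1, h2]
            apply List.sum_le_sum
            intro c hc
            exact hper c (by simpa using hc)
          have ht0le : t0 * hnum ≤ (m - 1 - L) * q := by
            have hb := (PySem.Int.floordiv_eq_iff_of_pos hnum_pos).mp ht0.symm
            nlinarith
          have hq0 : (0:Int) < q := by rw [hq]; norm_num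
          nlinarith
      have ht1T : t1 < T := by
        by_contra hc
        push_neg at hc
        have := solF_mono hpos hc
        omega
      -- B's initial remaining count r = m - solF t1
      have hr_eq : cores.foldl (fun s c => s - PySem.Int.floordiv t1 c) m
          = m - solF cores t1 := by
        rw [foldl_sub_eq]; rfl
      rw [hnum_eq, ← ht0, ← ht1, hr_eq]
      rw [solEvtB_run cores hne hpos m T ha3 ha4 _ t1 ht1T (by omega) (le_refl _)]
      -- A's n2 is the same count at T
      have hsum : (cores.map (fun x => PySem.Int.floordiv (T - 1) x)).sum
          = solF cores (T - 1) := rfl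
      rw [hsum]
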